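-- pv_equiv track=rewrite | github.com/rogerliu37/Most-Active-Cookie | process/calculate_most_frequent.py | calculate_most_frequent
-- ===== SOURCE A (Python) =====
-- def calculate_most_frequent(cookie_logs, day):
--
--     try:
--         max_value = max(cookie_logs[day].values())
--         cookies = []
--
--         # uses for loop to take account or the possibility of multiple cookies having the same frequency
--         for cookie, frequency in cookie_logs[day].items():
--             if frequency == max_value:
--                 cookies.append(cookie)
--         return cookies
--
--     except ValueError:
--         return "You have entered an invalid date. Please try again..."
-- ===== SOURCE B (Python) =====
-- def calculate_most_frequent(cookie_logs, day):
--     day_log = cookie_logs[day]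
--     # inverted index: frequency -> cookies with that frequency, in insertion order
--     groups = {}
--     for cookie, frequency in day_log.items():
--         groups.setdefault(frequency, []).append(cookie)
--     try:
--         return groups[max(groups)]
--     except ValueError:
--         return "You have entered an invalid date. Please try again..."
-- ===== Notes on version B (the rewrite author's own statement) =====
-- stated objective: alternative
-- what changed: B builds an inverted index frequency->cookies in one pass and returns the bucket of the largest frequency key, instead of A's max over values followed by a separate filtering pass over the items.
-- outside the precondition, e.g. on calculate_most_frequent({}, 'd'): A raises KeyError, B raises KeyError
import Mathlib
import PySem

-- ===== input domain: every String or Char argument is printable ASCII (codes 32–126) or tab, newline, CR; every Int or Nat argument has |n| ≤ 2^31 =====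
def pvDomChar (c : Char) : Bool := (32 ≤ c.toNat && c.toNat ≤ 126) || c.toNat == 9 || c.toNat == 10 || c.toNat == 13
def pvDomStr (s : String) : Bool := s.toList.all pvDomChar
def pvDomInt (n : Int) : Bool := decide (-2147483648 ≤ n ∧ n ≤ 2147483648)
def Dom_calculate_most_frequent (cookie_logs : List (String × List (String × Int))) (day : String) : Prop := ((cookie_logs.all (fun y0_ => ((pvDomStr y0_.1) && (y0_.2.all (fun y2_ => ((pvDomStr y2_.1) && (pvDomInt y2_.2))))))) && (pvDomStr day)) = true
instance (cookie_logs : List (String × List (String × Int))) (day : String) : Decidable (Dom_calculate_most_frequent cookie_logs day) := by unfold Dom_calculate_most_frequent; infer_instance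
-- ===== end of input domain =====

-- B replaces A's max-over-values + second filtering pass by a one-pass inverted index
-- frequency → cookies, then returns the bucket of the largest key (alternative decomposition,
-- same cost; return value equal on all admitted inputs).

-- ===== PORT A =====
-- max(d.values()); then one loop appending cookies whose frequency equals the max.
def calculate_most_frequent (cookie_logs : List (String × List (String × Int))) (day : String) : List String :=
  match (PySem.Dict.ofList cookie_logs).get? day with
  | none => []          -- KeyError in Python; outside Pre_
  | some rawDay =>
    let d := PySem.Dict.ofList rawDay
    match PySem.List.max? d.values (fun v => v) with
    | none => []        -- ValueError path: Python returns an error STRING; outside Pre_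
    | some max_value =>
      d.items.foldl (fun cookies p => if p.2 == max_value then cookies ++ [p.1] else cookies) []

-- ===== PORT B =====
-- one pass building groups : frequency → list of cookies; answer = groups[max(groups)].
def calculate_most_frequent_alt (cookie_logs : List (String × List (String × Int))) (day : String) : List String :=
  match (PySem.Dict.ofList cookie_logs).get? day with
  | none => []          -- KeyError in Python; outside Pre_
  | some rawDay =>
    let day_log := PySem.Dict.ofList rawDay
    let groups : PySem.Dict Int (List String) :=
      day_log.items.foldl (fun g p => g.modify p.2 [] (fun l => l ++ [p.1])) PySem.Dict.empty
    match PySem.List.max? groups.keys (fun v => v) with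
    | none => []        -- ValueError path: Python returns an error STRING; outside Pre_
    | some m => groups.getD m []

-- ===== PRECONDITION & SPEC =====
-- Pre_ excludes inputs where A raises KeyError (day not a key) and inputs where the day's
-- dict is empty, on which A returns an error STRING, not a list of strings (outside the
-- declared return type List String).
def Pre_calculate_most_frequent (cookie_logs : List (String × List (String × Int))) (day : String) : Prop :=
  ((PySem.Dict.ofList cookie_logs).get? day).getD [] ≠ []
instance (cookie_logs : List (String × List (String × Int))) (day : String) : Decidable (Pre_calculate_most_frequent cookie_logs day) := by unfold Pre_calculate_most_frequent; infer_instance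

def pvWitness_calculate_most_frequent : (List (String × List (String × Int))) × String :=
  ([("2018-12-09", [("AtY0laUfhglK3lC7", 2), ("SAZuXPGUrfbcn5UA", 1), ("5UAVanZf6UtGyKVS", 2)])], "2018-12-09")

def Spec_calculate_most_frequent (cookie_logs : List (String × List (String × Int))) (day : String) (out : List String) : Prop := out = calculate_most_frequent_alt cookie_logs day
instance (cookie_logs : List (String × List (String × Int))) (day : String) (out : List String) : Decidable (Spec_calculate_most_frequent cookie_logs day out) := by unfold Spec_calculate_most_frequent; infer_instance

-- ===== CLAIM (what is proved, stated in full; the proofs are below) =====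
def Claim_equal_calculate_most_frequent : Prop := ∀ (cookie_logs : List (String × List (String × Int))) (day : String), Dom_calculate_most_frequent cookie_logs day → Pre_calculate_most_frequent cookie_logs day → Spec_calculate_most_frequent cookie_logs day (calculate_most_frequent cookie_logs day)

-- ===== LEMMAS AND PROOFS =====

-- inserting returns the same keys list as Set.add on the keys
theorem keys_insert_eq_add {κ ν : Type} [BEq κ] [LawfulBEq κ] (d : PySem.Dict κ ν) (k : κ) (v : ν) :
    (d.insert k v).keys = PySem.Set.add d.keys k := by
  have hc : (List.map (fun x => x.1) d.items).contains k = d.items.any fun p => p.1 == k := by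
    rw [Bool.eq_iff_iff]; simp [List.any_eq_true]
  simp only [PySem.Dict.insert, PySem.Dict.keys, PySem.Set.add, PySem.Set.contains, hc, PySem.Dict.contains]
  split
  · next h =>
      simp only [List.map_map]
      exact List.map_congr_left (fun p _ => by dsimp; split <;> simp_all)
  · simp

theorem items_length_le_insert {κ ν : Type} [BEq κ] (d : PySem.Dict κ ν) (k : κ) (v : ν) :
    d.items.length ≤ (d.insert k v).items.length := by
  simp only [PySem.Dict.insert]; split <;> simp

theorem items_foldl_insert_ne_nil {κ ν : Type} [BEq κ] (l : List (κ × ν)) (d : PySem.Dict κ ν)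
    (h : d.items ≠ []) : (l.foldl (fun acc p => acc.insert p.1 p.2) d).items ≠ [] := by
  induction l generalizing d with
  | nil => exact h
  | cons p t ih =>
      simp only [List.foldl_cons]
      apply ih
      intro hnil
      have h1 := items_length_le_insert d p.1 p.2
      rw [hnil] at h1
      simp at h1
      exact h h1

-- the grouping fold keyed by p.2 appending p.1: its keys and its buckets
theorem keys_groupFold (l : List (String × Int)) (d : PySem.Dict Int (List String)) :
    (l.foldl (fun g p => g.modify p.2 [] (fun a => a ++ [p.1])) d).keys
      = PySem.Set.update d.keys (l.map (·.2)) := by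
  induction l generalizing d with
  | nil => simp [PySem.Set.update_nil]
  | cons p t ih =>
      simp only [List.foldl_cons, List.map_cons, ih, PySem.Dict.keys_modify,
        keys_insert_eq_add, PySem.Set.update_cons]

theorem getD_groupFold (l : List (String × Int)) (d : PySem.Dict Int (List String)) (v : Int) :
    (l.foldl (fun g p => g.modify p.2 [] (fun a => a ++ [p.1])) d).getD v []
      = d.getD v [] ++ ((l.filter (fun p => p.2 == v)).map (·.1)) := by
  have := PySem.Dict.getD_foldl_modify_append (l := l.map (fun p => (p.2, p.1)))
    (d := d) (c := v)
  simpa [List.foldl_map, List.filter_map, Function.comp] using this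

-- the maximum of a nonempty Int list is determined by membership and upper-bound-ness
theorem max?_eq_of_mem_iff (xs ys : List Int)
    (h : ∀ x : Int, x ∈ xs ↔ x ∈ ys) {a b : Int}
    (ha : PySem.List.max? xs (fun v => v) = some a)
    (hb : PySem.List.max? ys (fun v => v) = some b) : a = b := by
  have hma := PySem.List.max?_mem ha
  have hmb := PySem.List.max?_mem hb
  have h1 := PySem.List.max?_isMax ha b ((h b).mpr hmb)
  have h2 := PySem.List.max?_isMax hb a ((h a).mp hma)
  exact le_antisymm h2 h1

-- ===== VERDICT (by name: the statement is the Claim_ definition above) =====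
theorem calculate_most_frequent_spec : Claim_equal_calculate_most_frequent := by
  intro cookie_logs day _ hpre
  unfold Spec_calculate_most_frequent
  unfold Pre_calculate_most_frequent at hpre
  unfold calculate_most_frequent calculate_most_frequent_alt
  cases hget : (PySem.Dict.ofList cookie_logs).get? day with
  | none => simp [hget] at hpre
  | some rawDay =>
    rw [hget] at hpre
    simp only [Option.getD_some] at hpre
    simp only
    set d := PySem.Dict.ofList rawDay with hd
    -- the day's dict is nonempty
    have hne : d.values ≠ [] := by
      intro hv
      have hitems : d.items = [] := by
        have := congrArg List.length hv
        simp only [PySem.Dict.values, List.length_map] at this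
        exact List.eq_nil_of_length_eq_zero this
      cases hraw : rawDay with
      | nil => exact hpre hraw
      | cons p t =>
          refine items_foldl_insert_ne_nil t (PySem.Dict.empty.insert p.1 p.2) ?_ ?_
          · simp [PySem.Dict.insert, PySem.Dict.empty, PySem.Dict.contains]
          · rw [hd, hraw] at hitems
            exact hitems
    cases hmax : PySem.List.max? d.values (fun v => v) with
    | none => exact absurd ((PySem.List.max?_eq_none_iff _ _).mp hmax) hne
    | some max_value =>
      -- B's max over groups.keys
      have hkeys : (d.items.foldl (fun g p => g.modify p.2 [] (fun l => l ++ [p.1]))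
          PySem.Dict.empty).keys = PySem.Set.ofList (d.items.map (·.2)) := by
        rw [keys_groupFold]
        simp [PySem.Dict.keys_empty, PySem.Set.update_nil_left]
      have hvals : d.values = d.items.map (·.2) := rfl
      cases hmax2 : PySem.List.max? (d.items.foldl (fun g p => g.modify p.2 [] (fun l => l ++ [p.1])) PySem.Dict.empty).keys (fun v => v) with
      | none =>
          have := (PySem.List.max?_eq_none_iff _ _).mp hmax2
          rw [hkeys] at this
          have : d.items.map (·.2) = [] := by
            cases hx : d.items.map (·.2) with
            | nil => rfl
            | cons y t =>
                exfalso
                have hy : y ∈ PySem.Set.ofList (d.items.map (·.2)) := by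
                  rw [PySem.Set.mem_ofList, hx]; exact List.mem_cons_self ..
                rw [this] at hy; exact (List.not_mem_nil) hy
          rw [hvals] at hne; exact absurd this hne
      | some m =>
          have hm : max_value = m := by
            refine max?_eq_of_mem_iff d.values
              (d.items.foldl (fun g p => g.modify p.2 [] (fun l => l ++ [p.1])) PySem.Dict.empty).keys
              ?_ hmax hmax2
            intro x
            rw [hkeys, PySem.Set.mem_ofList, hvals]
          dsimp only
          rw [getD_groupFold]
          simp only [PySem.List.foldl_append_if]
          simp [hm, PySem.Dict.getD_empty]
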